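-- pv_equiv track=rewrite | github.com/1234ngochai/Exact-Pattern-Matching-Using-Extended-and-Optimized-Boyer-Moore-s-Algorithm | Exact Pattern Matching Using Extended and Optimized Boyer-Moore's Algorithm.py | compute_matched_prefix
-- ===== SOURCE A (Python) =====
-- def compute_z_table(s):
--     # Initialize the Z-array with zeros for each character in the string
--     z = [0] * len(s)
--     # The first Z-value is the length of the entire string
--     z[0] = len(s)
--
--     # Initialize pointers for the Z-box: left and right boundaries
--     left, right = 0, 0
--     for i in range(1, len(s)): # Start from the second character
--         if i > right:
--             # If i is outside the current Z-box, we start a new Z-box at i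
--             left, right = i, i # reset the z-box pointer, set it to i
--
--              # Expand the Z-box as long as the substring from left matches the prefix of the string
--             while right < len(s) and s[right - left] == s[right]:
--                 right += 1
--             # The length of the matched substring is stored in Z[i]
--             z[i] = right - left
--             right -= 1 # decrease right as the last i implement is not a match
--         else:
--             # if I inside the z box, we used the already computed value in the z table
--             k = i - left # k is the mirror position of i in the z box
--
--             # if the z value at the position does not exceed the z box
--             if z[k] < right - i + 1:
--                 z[i] = z[k] # We can assign the Z-value of k to i
--             else:
--             # if z value exceed the z box, we have to manually expand the Z-box
--                 left = i
--                 # Expand the Z-box as long as the substring from left matches the prefix of the string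
--                 while right < len(s) and s[right - left] == s[right]:
--                     right += 1
--                 z[i] = right - left
--                 right -= 1 # decrease right as the last i implement is not a match
--     return z
--
-- def compute_matched_prefix(pat):
--     m = len(pat)
--     z = compute_z_table(pat)  # Compute the Z-array for pat
--     mp = [-1] * m  # Initialize matched prefix array with -1
--
--     start_position = -1  # Initialize start position for matched segments
--
--     # Access Z-values from right to left, including index 0
--     for j in range(m-1, -1, -1):
--         # z[j] == m - j indicating the length of the matched suffix at position j have a length that able to reached to the end of the
--         #patther which mean a matched prefix
--         if z[j] == m - j:
--             # If a full match to the end of the pattern is found, update start_position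
--             # we are going from right to left so that it make sure that all the prefix value are at it highest
--             start_position = j
--
--         # Update mp for positions that correspond to this segment
--         mp[m-j-1] = start_position
--
--     return mp
-- ===== SOURCE B (Python) =====
-- def compute_matched_prefix(pat):
--     # Simpler: no Z-table; a border start j is one where the suffix pat[j:]
--     # equals the prefix of the same length. Walk j from m-1 down to 0 keeping
--     # the smallest border start seen so far (A's start_position), appending it.
--     m = len(pat)
--     mp = []
--     start_position = -1
--     for j in range(m - 1, -1, -1):
--         if pat[j:] == pat[:m - j]:
--             start_position = j
--         mp.append(start_position)
--     return mp
-- ===== Notes on version B (the rewrite author's own statement) =====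
-- stated objective: simpler
-- what changed: B removes the Z-table and Z-box machinery entirely: it walks j from m-1 down to 0 and checks each border start directly by comparing the suffix pat[j:] with the same-length prefix, appending the running start position.
import Mathlib
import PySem

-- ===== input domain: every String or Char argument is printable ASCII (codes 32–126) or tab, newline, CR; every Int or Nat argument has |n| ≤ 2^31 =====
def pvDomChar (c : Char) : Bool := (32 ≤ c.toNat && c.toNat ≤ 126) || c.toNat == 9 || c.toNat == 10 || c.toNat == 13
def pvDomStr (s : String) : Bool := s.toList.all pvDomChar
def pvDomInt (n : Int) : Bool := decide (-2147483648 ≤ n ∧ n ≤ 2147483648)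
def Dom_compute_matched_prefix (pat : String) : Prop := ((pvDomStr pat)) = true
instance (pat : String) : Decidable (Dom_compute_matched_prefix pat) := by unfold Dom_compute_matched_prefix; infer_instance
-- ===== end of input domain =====

-- B drops the Z-table entirely: a border start j is simply a position whose suffix equals
-- the same-length prefix, checked directly; simpler (O(m^2) vs A's O(m)), not faster.

-- ===== PORT A =====
-- the inner `while right < len(s) and s[right-left] == s[right]: right += 1`; returns the final right
def pvZWhile (s : List Char) (left right : Nat) : Nat :=
  if _h : right < s.length then
    if s.getD (right - left) ' ' = s.getD right ' ' then pvZWhile s left (right + 1) else right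
  else right
termination_by s.length - right

-- one iteration of A's `for i in range(1, len(s))` loop; state = (z, left, right)
def pvZStep (s : List Char) (st : List Int × Nat × Nat) (i : Nat) : List Int × Nat × Nat :=
  let z := st.1; let left := st.2.1; let right := st.2.2
  if right < i then
    let r := pvZWhile s i i
    (z.set i ((r : Int) - (i : Int)), i, r - 1)
  else
    let k := i - left
    if z.getD k 0 < (right : Int) - (i : Int) + 1 then
      (z.set i (z.getD k 0), left, right)
    else
      let r := pvZWhile s i right
      (z.set i ((r : Int) - (i : Int)), i, r - 1)

def pvZTable (s : List Char) : List Int :=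
  let m := s.length
  let z := (List.replicate m (0 : Int)).set 0 (m : Int)
  ((List.range' 1 (m - 1)).foldl (pvZStep s) (z, 0, 0)).1

-- one iteration of A's final `for j in range(m-1, -1, -1)` loop; state = (mp, start_position)
def pvMPStepA (m : Nat) (cond : Nat → Bool) (st : List Int × Int) (j : Nat) : List Int × Int :=
  let sp := if cond j then (j : Int) else st.2
  (st.1.set (m - j - 1) sp, sp)

def compute_matched_prefix (pat : String) : List Int :=
  let s := pat.toList
  let m := s.length
  let z := pvZTable s
  ((List.range m).reverse.foldl
      (pvMPStepA m (fun j => z.getD j 0 == (m : Int) - (j : Int)))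
      (List.replicate m (-1 : Int), -1)).1

-- ===== PORT B =====
-- one iteration of B's loop; state = (mp, start_position), mp grows by append
def pvMPStepB (cond : Nat → Bool) (st : List Int × Int) (j : Nat) : List Int × Int :=
  let sp := if cond j then (j : Int) else st.2
  (st.1 ++ [sp], sp)

def compute_matched_prefix_alt (pat : String) : List Int :=
  let s := pat.toList
  let m := s.length
  ((List.range m).reverse.foldl
      (pvMPStepB (fun j => s.drop j == s.take (m - j)))
      ([], -1)).1

-- ===== PRECONDITION & SPEC =====
-- Pre_ excludes only the empty string, on which A raises IndexError (z[0] = len(s) on an empty list).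
def Pre_compute_matched_prefix (pat : String) : Prop := pat ≠ ""
instance (pat : String) : Decidable (Pre_compute_matched_prefix pat) := by unfold Pre_compute_matched_prefix; infer_instance
def pvWitness_compute_matched_prefix : String := "abcab"

def Spec_compute_matched_prefix (pat : String) (out : List Int) : Prop := out = compute_matched_prefix_alt pat
instance (pat : String) (out : List Int) : Decidable (Spec_compute_matched_prefix pat out) := by unfold Spec_compute_matched_prefix; infer_instance

-- ===== CLAIM (what is proved, stated in full; the proofs are below) =====
def Claim_equal_compute_matched_prefix : Prop := ∀ (pat : String), Dom_compute_matched_prefix pat → Pre_compute_matched_prefix pat → Spec_compute_matched_prefix pat (compute_matched_prefix pat)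

-- ===== LEMMAS AND PROOFS =====

/-- Length of the longest common prefix of two lists of characters. -/
def lcp : List Char → List Char → Nat
  | a :: as, b :: bs => if a = b then lcp as bs + 1 else 0
  | _, _ => 0

theorem lcp_self (s : List Char) : lcp s s = s.length := by
  induction s with
  | nil => rfl
  | cons a as ih => simp [lcp, ih]

theorem lcp_le_right (s t : List Char) : lcp s t ≤ t.length := by
  induction s generalizing t with
  | nil => simp [lcp]
  | cons a as ih =>
    cases t with
    | nil => simp [lcp]
    | cons b bs =>
      simp only [lcp]
      split
      · simpa using ih bs
      · simp

theorem getD_eq_of_lt_lcp {s t : List Char} {d : Nat} (c : Char) (h : d < lcp s t) :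
    s.getD d c = t.getD d c := by
  induction s generalizing t d with
  | nil => simp [lcp] at h
  | cons a as ih =>
    cases t with
    | nil => simp [lcp] at h
    | cons b bs =>
      simp only [lcp] at h
      split at h
      · cases d with
        | zero => simpa using ‹a = b›
        | succ d' => simpa using ih (t := bs) (d := d') (by omega)
      · omega

theorem le_lcp_of {s t : List Char} {k : Nat} (c : Char)
    (hs : k ≤ s.length) (ht : k ≤ t.length)
    (h : ∀ d, d < k → s.getD d c = t.getD d c) : k ≤ lcp s t := by
  induction s generalizing t k with
  | nil => simp at hs; omega
  | cons a as ih =>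
    cases t with
    | nil => simp at ht; omega
    | cons b bs =>
      cases k with
      | zero => omega
      | succ k' =>
        have hab : a = b := by simpa using h 0 (by omega)
        simp only [lcp, if_pos hab]
        have : k' ≤ lcp as bs := by
          refine ih (by simpa using hs) (by simpa using ht) ?_
          intro d hd
          simpa using h (d + 1) (by omega)
        omega

theorem lcp_mismatch {s t : List Char} (c : Char)
    (hs : lcp s t < s.length) (ht : lcp s t < t.length) :
    s.getD (lcp s t) c ≠ t.getD (lcp s t) c := by
  induction s generalizing t with
  | nil => simp at hs
  | cons a as ih =>
    cases t with
    | nil => simp at ht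
    | cons b bs =>
      by_cases hab : a = b
      · have e : lcp (a :: as) (b :: bs) = lcp as bs + 1 := by simp [lcp, hab]
        rw [e] at hs ht ⊢
        simpa using ih (by simpa using hs) (by simpa using ht)
      · have e : lcp (a :: as) (b :: bs) = 0 := by simp [lcp, hab]
        rw [e]
        simpa using hab

theorem getD_drop (s : List Char) (j d : Nat) (c : Char) :
    (s.drop j).getD d c = s.getD (j + d) c := by
  by_cases h : j + d < s.length
  · have h1 : d < (s.drop j).length := by simp; omega
    rw [List.getD_eq_getElem _ c h1, List.getD_eq_getElem _ c h]
    simp [List.getElem_drop]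
  · have h1 : (s.drop j).length ≤ d := by simp; omega
    rw [List.getD_eq_default _ c h1, List.getD_eq_default _ c (by omega)]

theorem lcp_take (s : List Char) (n : Nat) : lcp s (s.take n) = min n s.length := by
  induction s generalizing n with
  | nil => simp [lcp]
  | cons a as ih =>
    cases n with
    | zero => simp [lcp]
    | succ n' =>
      have e : lcp (a :: as) (a :: as.take n') = lcp as (as.take n') + 1 := by simp [lcp]
      rw [List.take_succ_cons, e, ih]
      simp only [List.length_cons]
      omega

theorem take_eq_iff_lcp {s t : List Char} (h : t.length ≤ s.length) :
    t = s.take t.length ↔ lcp s t = t.length := by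
  constructor
  · intro he
    have h2 := lcp_take s t.length
    rw [← he] at h2
    omega
  · intro he
    refine List.ext_getElem (by simp; omega) ?_
    intro i h1 h2
    have hi : i < lcp s t := by omega
    have h3 := getD_eq_of_lt_lcp (s := s) (t := t) ' ' hi
    rw [List.getD_eq_getElem _ ' ' (by omega), List.getD_eq_getElem _ ' ' h1] at h3
    rw [List.getElem_take]
    exact h3.symm

theorem pvZWhile_spec (s : List Char) (left right : Nat)
    (h1 : left ≤ right) (h2 : right ≤ s.length)
    (h3 : right - left ≤ lcp s (s.drop left)) :
    pvZWhile s left right = left + lcp s (s.drop left) := by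
  revert h1 h2 h3
  fun_induction pvZWhile s left right with
  | case1 right hlt heq ih =>
    intro h1 h2 h3
    refine ih (by omega) (by omega) ?_
    by_contra hc
    have hlcp : lcp s (s.drop left) = right - left := by omega
    have hm : s.getD (right - left) ' ' ≠ (s.drop left).getD (right - left) ' ' := by
      rw [← hlcp]
      exact lcp_mismatch ' ' (by omega) (by simp; omega)
    rw [getD_drop] at hm
    have e : left + (right - left) = right := by omega
    rw [e] at hm
    exact hm heq
  | case2 right hlt hne =>
    intro h1 h2 h3
    have hle : lcp s (s.drop left) ≤ right - left := by
      by_contra hc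
      have hq := getD_eq_of_lt_lcp (s := s) (t := s.drop left) ' ' (d := right - left) (by omega)
      rw [getD_drop] at hq
      have e : left + (right - left) = right := by omega
      rw [e] at hq
      exact hne hq
    omega
  | case3 right hge =>
    intro h1 h2 h3
    have hr : right = s.length := by omega
    have := lcp_le_right s (s.drop left)
    simp at this
    omega

/-- Invariant of A's main z-loop after processing indices 1..i. -/
def ZInv (s : List Char) (i : Nat) (st : List Int × Nat × Nat) : Prop :=
  st.1.length = s.length ∧
  (∀ j, st.1.getD j 0 = if j ≤ i ∧ j < s.length then (lcp s (s.drop j) : Int) else 0) ∧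
  ((i = 0 ∧ st.2.1 = 0 ∧ st.2.2 = 0) ∨
   (1 ≤ st.2.1 ∧ st.2.1 ≤ i ∧ st.2.1 ≤ st.2.2 + 1 ∧ st.2.2 < s.length ∧
    st.2.2 + 1 - st.2.1 ≤ lcp s (s.drop st.2.1)))

theorem getD_set_int (l : List Int) (i j : Nat) (a : Int) :
    (l.set i a).getD j 0 = if i = j ∧ i < l.length then a else l.getD j 0 := by
  by_cases h1 : i = j
  · subst h1
    by_cases h2 : i < l.length
    · simp [List.getD, h2]
    · have h3 : l.length ≤ i := by omega
      simp [List.getD, h2]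
  · have h4 : ¬ (i = j ∧ i < l.length) := by tauto
    simp [List.getD, h1]

theorem pvZStep_def (s : List Char) (z : List Int) (left right i : Nat) :
    pvZStep s (z, left, right) i =
      if right < i then
        (z.set i ((pvZWhile s i i : Int) - (i : Int)), i, pvZWhile s i i - 1)
      else if z.getD (i - left) 0 < (right : Int) - (i : Int) + 1 then
        (z.set i (z.getD (i - left) 0), left, right)
      else
        (z.set i ((pvZWhile s i right : Int) - (i : Int)), i, pvZWhile s i right - 1) := rfl

theorem ZInv_step (s : List Char) (i : Nat) (z : List Int) (left right : Nat)
    (hinv : ZInv s i (z, left, right)) (hi : i + 1 < s.length) :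
    ZInv s (i + 1) (pvZStep s (z, left, right) (i + 1)) := by
  obtain ⟨hlen, hz, hbox⟩ := hinv
  simp only at hlen hz hbox
  -- the z-array part is the same in all three branches once the new value is known correct
  have zpart : ∀ v : Int, v = (lcp s (s.drop (i + 1)) : Int) →
      ∀ j, (z.set (i + 1) v).getD j 0 =
        if j ≤ i + 1 ∧ j < s.length then (lcp s (s.drop j) : Int) else 0 := by
    intro v hv j
    rw [getD_set_int, hz j]
    by_cases hji : i + 1 = j
    · subst hji
      rw [if_pos ⟨rfl, by omega⟩, if_pos ⟨le_refl _, by omega⟩, hv]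
    · rw [if_neg (fun h => hji h.1)]
      split_ifs <;> first | rfl | omega
  by_cases hbr : right < i + 1
  · -- branch 1: new z-box at i+1
    have hw := pvZWhile_spec s (i + 1) (i + 1) (le_refl _) (by omega) (by omega)
    have hLle : lcp s (s.drop (i + 1)) ≤ s.length - (i + 1) := by
      have := lcp_le_right s (s.drop (i + 1)); simp at this; omega
    rw [pvZStep_def, if_pos hbr]
    unfold ZInv
    dsimp only
    refine ⟨by simpa using hlen, ?_, Or.inr ?_⟩
    · refine zpart _ ?_
      rw [hw]; push_cast; omega
    · rw [hw]
      refine ⟨by omega, by omega, by omega, by omega, by omega⟩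
  · -- i+1 inside the z-box
    have hbox' : 1 ≤ left ∧ left ≤ i ∧ left ≤ right + 1 ∧ right < s.length ∧
        right + 1 - left ≤ lcp s (s.drop left) := by
      rcases hbox with ⟨_, _, h0⟩ | h
      · omega
      · exact h
    obtain ⟨hl1, hli, hlr, hrs, hmatch⟩ := hbox'
    have hbox_char : ∀ d, d < right + 1 - left → s.getD d ' ' = s.getD (left + d) ' ' := by
      intro d hd
      have hq := getD_eq_of_lt_lcp (s := s) (t := s.drop left) ' ' (d := d) (by omega)
      rwa [getD_drop] at hq
    have hki : i + 1 - left ≤ i := by omega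
    have hks : i + 1 - left < s.length := by omega
    have hzk : z.getD (i + 1 - left) 0 = (lcp s (s.drop (i + 1 - left)) : Int) := by
      rw [hz (i + 1 - left)]; simp [hki, hks]
    have hLkle : lcp s (s.drop (i + 1 - left)) ≤ s.length - (i + 1 - left) := by
      have := lcp_le_right s (s.drop (i + 1 - left)); simp at this; omega
    -- in-box characters copy the prefix: s[d] = s[(i+1)+d] below the in-box budget
    have hcopy_char : ∀ d, d < lcp s (s.drop (i + 1 - left)) → i + 1 + d ≤ right →
        s.getD d ' ' = s.getD (i + 1 + d) ' ' := by
      intro d hd1 hd2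
      have h1 : s.getD d ' ' = (s.drop (i + 1 - left)).getD d ' ' := getD_eq_of_lt_lcp ' ' hd1
      rw [getD_drop] at h1
      have h2 : s.getD (i + 1 - left + d) ' ' = s.getD (left + (i + 1 - left + d)) ' ' :=
        hbox_char (i + 1 - left + d) (by omega)
      have e : left + (i + 1 - left + d) = i + 1 + d := by omega
      rw [e] at h2
      rw [h1, h2]
  
    by_cases hsm : z.getD (i + 1 - left) 0 < (right : Int) - ((i + 1 : Nat) : Int) + 1
    · -- copy case: z[i+1] := z[k]
      have hsm' : lcp s (s.drop (i + 1 - left)) ≤ right - (i + 1) := by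
        rw [hzk] at hsm; push_cast at hsm; omega
      have hcopy : lcp s (s.drop (i + 1)) = lcp s (s.drop (i + 1 - left)) := by
        have hge : lcp s (s.drop (i + 1 - left)) ≤ lcp s (s.drop (i + 1)) := by
          refine le_lcp_of ' ' (by omega) (by simp; omega) ?_
          intro d hd
          rw [getD_drop]
          exact hcopy_char d hd (by omega)
        have hlt : lcp s (s.drop (i + 1)) ≤ lcp s (s.drop (i + 1 - left)) := by
          by_contra hc
          have hmm : s.getD (lcp s (s.drop (i + 1 - left))) ' ' ≠
              (s.drop (i + 1 - left)).getD (lcp s (s.drop (i + 1 - left))) ' ' :=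
            lcp_mismatch ' ' (by omega) (by simp; omega)
          rw [getD_drop] at hmm
          have h2 : s.getD (i + 1 - left + lcp s (s.drop (i + 1 - left))) ' ' =
              s.getD (left + (i + 1 - left + lcp s (s.drop (i + 1 - left)))) ' ' :=
            hbox_char _ (by omega)
          have e : left + (i + 1 - left + lcp s (s.drop (i + 1 - left))) =
              i + 1 + lcp s (s.drop (i + 1 - left)) := by omega
          rw [e] at h2
          have h3 : s.getD (lcp s (s.drop (i + 1 - left))) ' ' =
              (s.drop (i + 1)).getD (lcp s (s.drop (i + 1 - left))) ' ' :=
            getD_eq_of_lt_lcp ' ' (by omega)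
          rw [getD_drop] at h3
          exact hmm (by rw [h3, ← h2])
        omega
      rw [pvZStep_def, if_neg hbr, if_pos hsm]
      unfold ZInv
      dsimp only
      refine ⟨by simpa using hlen, ?_, Or.inr ⟨hl1, by omega, hlr, hrs, hmatch⟩⟩
      refine zpart _ ?_
      rw [hzk, hcopy]
    · -- extend case: left := i+1, expand from the current right
      have hsm' : right - (i + 1) + 1 ≤ lcp s (s.drop (i + 1 - left)) := by
        rw [hzk] at hsm; push_cast at hsm; omega
      have hpre : right - (i + 1) ≤ lcp s (s.drop (i + 1)) := by
        refine le_lcp_of ' ' (by omega) (by simp; omega) ?_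
        intro d hd
        rw [getD_drop]
        exact hcopy_char d (by omega) (by omega)
      have hw := pvZWhile_spec s (i + 1) right (by omega) (by omega) hpre
      have hLle : lcp s (s.drop (i + 1)) ≤ s.length - (i + 1) := by
        have := lcp_le_right s (s.drop (i + 1)); simp at this; omega
      rw [pvZStep_def, if_neg hbr, if_neg hsm]
      unfold ZInv
      dsimp only
      refine ⟨by simpa using hlen, ?_, Or.inr ?_⟩
      · refine zpart _ ?_
        rw [hw]; push_cast; omega
      · rw [hw]
        refine ⟨by omega, by omega, by omega, by omega, by omega⟩

theorem ZInv_fold (s : List Char) (hs : s ≠ []) (n : Nat) (hn : n < s.length) :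
    ZInv s n ((List.range' 1 n).foldl (pvZStep s)
      ((List.replicate s.length (0 : Int)).set 0 (s.length : Int), 0, 0)) := by
  induction n with
  | zero =>
    have hlen : 0 < s.length := List.length_pos_iff.mpr hs
    simp only [List.range'_zero, List.foldl_nil]
    refine ⟨by simp, ?_, Or.inl ⟨rfl, rfl, rfl⟩⟩
    intro j
    rw [getD_set_int]
    by_cases h0 : j = 0
    · subst h0
      rw [if_pos ⟨rfl, by simpa using hlen⟩, if_pos ⟨le_refl _, hlen⟩]
      simp [lcp_self]
    · rw [if_neg (fun h => h0 h.1.symm)]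
      have hrep : (List.replicate s.length (0 : Int)).getD j 0 = 0 := by
        rcases Nat.lt_or_ge j s.length with h | h
        · rw [List.getD_eq_getElem _ 0 (by simpa using h)]; simp
        · rw [List.getD_eq_default _ 0 (by simpa using h)]
      rw [hrep, if_neg (by omega)]
  | succ n ih =>
    have e : List.range' 1 (n + 1) = List.range' 1 n ++ [n + 1] := by
      rw [List.range'_concat]; simp [Nat.add_comm]
    rw [e, List.foldl_append]
    simp only [List.foldl_cons, List.foldl_nil]
    have h := ih (by omega)
    rcases hfold : (List.range' 1 n).foldl (pvZStep s)
        ((List.replicate s.length (0 : Int)).set 0 (s.length : Int), 0, 0) with ⟨z, left, right⟩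
    rw [hfold] at h
    exact ZInv_step s n z left right h hn

theorem pvZTable_getD (s : List Char) (hs : s ≠ []) (j : Nat) (hj : j < s.length) :
    (pvZTable s).getD j 0 = (lcp s (s.drop j) : Nat) := by
  have hinv := ZInv_fold s hs (s.length - 1) (by have := List.length_pos_iff.mpr hs; omega)
  obtain ⟨_, hz, _⟩ := hinv
  unfold pvZTable
  simp only
  rw [hz j]
  simp [hj, Nat.le_sub_one_of_lt hj]

-- B's fold with an accumulator prefix
theorem foldB_acc (cond : Nat → Bool) (js : List Nat) (acc : List Int) (sp : Int) :
    js.foldl (pvMPStepB cond) (acc, sp) =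
      (acc ++ (js.foldl (pvMPStepB cond) ([], sp)).1, (js.foldl (pvMPStepB cond) ([], sp)).2) := by
  induction js generalizing acc sp with
  | nil => simp
  | cons j js ih =>
    simp only [List.foldl_cons, pvMPStepB]
    rw [ih, ih (acc := [] ++ [_])]
    simp

theorem take_set_succ (l : List Int) (k : Nat) (v : Int) (h : k < l.length) :
    (l.set k v).take (k + 1) = l.take k ++ [v] := by
  rw [List.set_eq_take_append_cons_drop, if_pos h, List.take_append]
  have h1 : (l.take k).length = k := by simp; omega
  rw [h1]
  have h2 : k + 1 - k = 1 := by omega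
  rw [h2]
  have h3 : List.take (k + 1) (List.take k l) = List.take k l := by
    rw [List.take_take]
    congr 1
    omega
  rw [h3]
  simp

theorem foldA_eq_foldB (m : Nat) (cond : Nat → Bool) : ∀ (n : Nat), n ≤ m →
    ∀ (mp : List Int) (sp : Int), mp.length = m →
    (List.range n).reverse.foldl (pvMPStepA m cond) (mp, sp) =
      (mp.take (m - n) ++ ((List.range n).reverse.foldl (pvMPStepB cond) ([], sp)).1,
       ((List.range n).reverse.foldl (pvMPStepB cond) ([], sp)).2) := by
  intro n
  induction n with
  | zero =>
    intro _ mp sp hmp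
    simp [List.take_of_length_le (le_of_eq hmp)]
  | succ n ih =>
    intro hn mp sp hmp
    rw [List.range_succ]
    simp only [List.reverse_append, List.reverse_cons, List.reverse_nil, List.nil_append,
      List.cons_append, List.foldl_cons, pvMPStepA, pvMPStepB]
    set sp' := if cond n then (n : Int) else sp with hsp'
    rw [ih (by omega) _ sp' (by simp [hmp])]
    rw [foldB_acc cond ((List.range n).reverse) [sp'] sp']
    set k := m - n - 1 with hk
    have e1 : (mp.set k sp').take (m - n) = mp.take k ++ [sp'] := by
      have h1 : m - n = k + 1 := by omega
      rw [h1, take_set_succ _ _ _ (by omega)]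
    rw [e1]
    have e2 : k = m - (n + 1) := by omega
    rw [e2, List.append_assoc]

theorem foldB_cond_congr (c1 c2 : Nat → Bool) (js : List Nat)
    (h : ∀ j ∈ js, c1 j = c2 j) (st : List Int × Int) :
    js.foldl (pvMPStepB c1) st = js.foldl (pvMPStepB c2) st := by
  induction js generalizing st with
  | nil => rfl
  | cons j js ih =>
    simp only [List.foldl_cons, pvMPStepB]
    rw [h j (by simp), ih (fun j hj => h j (by simp [hj]))]

-- ===== VERDICT (by name: the statement is the Claim_ definition above) =====
theorem compute_matched_prefix_spec : Claim_equal_compute_matched_prefix := by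
  intro pat _ hpre
  unfold Spec_compute_matched_prefix compute_matched_prefix compute_matched_prefix_alt
  dsimp only
  set s := pat.toList with hsdef
  have hs : s ≠ [] := by
    intro h
    exact hpre (by cases pat; simp [hsdef] at h; simp [h])
  set m := s.length with hm
  have hm0 : 0 < m := List.length_pos_iff.mpr hs
  set condA : Nat → Bool := fun j => (pvZTable s).getD j 0 == (m : Int) - (j : Int) with hcondA
  set condB : Nat → Bool := fun j => s.drop j == s.take (m - j) with hcondB
  have hcond : ∀ j ∈ (List.range m).reverse, condA j = condB j := by
    intro j hj
    rw [List.mem_reverse, List.mem_range] at hj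
    simp only [hcondA, hcondB]
    rw [pvZTable_getD s hs j hj]
    have h1 : ((lcp s (s.drop j) : Nat) : Int) = (m : Int) - (j : Int) ↔
        lcp s (s.drop j) = m - j := by omega
    have h2 : (s.drop j).length = m - j := by simp [hm]
    have h3 := take_eq_iff_lcp (s := s) (t := s.drop j) (by simp)
    rw [h2] at h3
    by_cases hb : lcp s (s.drop j) = m - j
    · simp [h1.mpr hb, (h3.mpr hb).symm]
    · have : ¬ s.drop j = s.take (m - j) := fun hc => hb (h3.mp hc)
      simp [h1, hb, this]
  rw [foldA_eq_foldB m condA m (le_refl m) _ _ (by simp)]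
  rw [foldB_cond_congr condA condB _ hcond]
  simp
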